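-- pv_equiv track=rewrite | github.com/bnmponce/SearcFile_MP | search_files_mag/src/com/jalasoft/search_files/utils/Validate_Input.py | is_sent_name_only_with_spaces
-- ===== SOURCE A (Python) =====
-- def is_sent_name_only_with_spaces(name):
--     """
--     is_sent_name_only_with_spaces this method verify if name contains only spaces
--     :param name: It is a string to verify it contains only spaces
--     :return: this attribute returns True if the string sent is only spaces the otherwise it will return false
--     """
--     result = True
--     counter = 0
--     while counter < len(name):
--         if name[counter] != ' ':
--             result = False
--         counter = counter + 1
--     return result
-- ===== SOURCE B (Python) =====
-- def is_sent_name_only_with_spaces(name):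
--     return name == ' ' * len(name)
-- ===== Notes on version B (the rewrite author's own statement) =====
-- stated objective: idiomatic
-- what changed: Replaces the index-counter while loop with a boolean flag by a single closed-form comparison of name against a string of spaces of the same length.
import Mathlib
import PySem

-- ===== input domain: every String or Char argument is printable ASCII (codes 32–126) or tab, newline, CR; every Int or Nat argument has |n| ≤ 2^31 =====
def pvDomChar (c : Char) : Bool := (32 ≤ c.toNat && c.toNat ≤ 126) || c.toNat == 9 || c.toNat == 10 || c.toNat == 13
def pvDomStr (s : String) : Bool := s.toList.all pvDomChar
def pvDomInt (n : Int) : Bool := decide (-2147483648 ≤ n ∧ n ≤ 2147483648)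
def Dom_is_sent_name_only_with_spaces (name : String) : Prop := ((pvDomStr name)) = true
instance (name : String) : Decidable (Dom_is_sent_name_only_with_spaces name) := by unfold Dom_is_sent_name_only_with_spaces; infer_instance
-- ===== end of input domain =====

-- B replaces A's index-counter while loop and boolean flag by the closed-form
-- comparison name == ' ' * len(name); objective: idiomatic.

-- ===== PORT A =====
-- while counter < len(name): visits each character in order, clearing the flag on a non-space.
def is_sent_name_only_with_spaces (name : String) : Bool :=
  name.toList.foldl (fun result c => if c ≠ ' ' then false else result) true

-- ===== PORT B =====
-- name == ' ' * len(name)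
def is_sent_name_only_with_spaces_alt (name : String) : Bool :=
  name.toList == List.replicate name.toList.length ' '

-- ===== PRECONDITION & SPEC =====
def Spec_is_sent_name_only_with_spaces (name : String) (out : Bool) : Prop := out = is_sent_name_only_with_spaces_alt name
instance (name : String) (out : Bool) : Decidable (Spec_is_sent_name_only_with_spaces name out) := by unfold Spec_is_sent_name_only_with_spaces; infer_instance

-- ===== CLAIM (what is proved, stated in full; the proofs are below) =====
def Claim_equal_is_sent_name_only_with_spaces : Prop := ∀ (name : String), Dom_is_sent_name_only_with_spaces name → Spec_is_sent_name_only_with_spaces name (is_sent_name_only_with_spaces name)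

-- ===== LEMMAS AND PROOFS =====
theorem pv_foldl_false (l : List Char) :
    l.foldl (fun result c => if c ≠ ' ' then false else result) false = false := by
  induction l with
  | nil => rfl
  | cons c l ih =>
    simp only [List.foldl]
    split <;> exact ih

theorem pv_loop_eq_replicate (l : List Char) :
    l.foldl (fun result c => if c ≠ ' ' then false else result) true
      = (l == List.replicate l.length ' ') := by
  induction l with
  | nil => rfl
  | cons c l ih =>
    simp only [List.foldl, List.length_cons, List.replicate_succ, List.cons_beq_cons]
    by_cases h : c = ' '
    · subst h
      rw [if_neg (by simp)]
      simpa using ih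
    · rw [if_pos h, pv_foldl_false]
      simp [h]

-- ===== VERDICT (by name: the statement is the Claim_ definition above) =====
theorem is_sent_name_only_with_spaces_spec : Claim_equal_is_sent_name_only_with_spaces := by
  intro name _
  unfold Spec_is_sent_name_only_with_spaces is_sent_name_only_with_spaces is_sent_name_only_with_spaces_alt
  exact pv_loop_eq_replicate name.toList
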